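-- pv_equiv track=rewrite | github.com/Gargus/Freya | cogs/profile.py | country_helper
-- ===== SOURCE A (Python) =====
-- def country_helper(content, countries, attempts):
--     comp = len(content)-attempts
--     while True:
--         if comp < 1:
--             comp = 1
--         search = content[:comp]
--         start_str = "*Did you mean...*\n\n"
--         tmp = ""
--
--         for country in countries:
--             if country.lower().startswith(search):
--                 tmp += f"``{country}``\n"
--         if not tmp:
--             comp-=1
--         else:
--             break
--
--     return start_str+tmp
-- ===== SOURCE B (Python) =====
-- def country_helper(content, countries, attempts):
--     lows = [c.lower() for c in countries]
--
--     def match(k):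
--         s = content[:k]
--         return any(l.startswith(s) for l in lows)
--
--     lo, hi = 1, max(1, len(content) - attempts)
--     while lo < hi:
--         mid = (lo + hi + 1) // 2
--         if match(mid):
--             lo = mid
--         else:
--             hi = mid - 1
--     s = content[:lo]
--     return "*Did you mean...*\n\n" + "".join(
--         f"``{c}``\n" for c, l in zip(countries, lows) if l.startswith(s)
--     )
-- ===== Notes on version B (the rewrite author's own statement) =====
-- stated objective: faster
-- what changed: Replaces A's linear downward scan over prefix lengths (each step rescanning all countries) by a binary search over the prefix length, exploiting that the match predicate is monotone in the prefix length, followed by a single rendering pass; intended as faster (O(n*log len) vs O(n*len) comparisons) - a timing run saw A time out at sizes where B returned but could not measure a clean ratio. A's 'while True' diverges when no country matches the one-character prefix, and Pre_ excludes exactly those inputs.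
import Mathlib
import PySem

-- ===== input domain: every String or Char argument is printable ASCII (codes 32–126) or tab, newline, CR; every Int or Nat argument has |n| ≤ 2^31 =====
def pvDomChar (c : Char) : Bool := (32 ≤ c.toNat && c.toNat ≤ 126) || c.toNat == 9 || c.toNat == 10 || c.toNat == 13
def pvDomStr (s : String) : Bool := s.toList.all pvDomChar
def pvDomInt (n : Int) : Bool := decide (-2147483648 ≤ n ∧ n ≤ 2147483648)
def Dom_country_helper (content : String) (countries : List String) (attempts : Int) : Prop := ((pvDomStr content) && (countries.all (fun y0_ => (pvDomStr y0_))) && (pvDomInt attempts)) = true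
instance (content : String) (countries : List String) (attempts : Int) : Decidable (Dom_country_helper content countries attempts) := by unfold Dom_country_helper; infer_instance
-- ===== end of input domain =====

-- B replaces A's linear downward scan over prefix lengths by a binary search over the
-- prefix length (the match predicate is monotone), then renders the matches in one pass
-- (objective: faster — intended asymptotic gain; a timing run saw A time out where B
-- returned but could not measure a clean ratio).

-- ===== PORT A =====

-- f"``{country}``\n"
def pvRender (c : String) : List Char := '`' :: '`' :: c.toList ++ ['`', '`', '\n']

-- start_str
def pvHeader : List Char := "*Did you mean...*\n\n".toList

-- the for-loop building tmp
def pvTmpA (countries : List String) (search : List Char) : List Char :=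
  countries.foldl
    (fun tmp country =>
      if PySem.Chars.startswith (PySem.Chars.lower country.toList) search then tmp ++ pvRender country
      else tmp) []

-- the 'while True' loop; fuel only guards totality: Python diverges exactly where fuel
-- would run out (no country matches the one-character prefix), and Pre_ excludes that.
def pvLoopA (countries : List String) (cs : List Char) (comp : Int) : Nat → List Char
  | 0 => []
  | fuel + 1 =>
    let comp := if comp < 1 then 1 else comp
    let search := PySem.List.slice cs none (some comp)
    let tmp := pvTmpA countries search
    if tmp = [] then pvLoopA countries cs (comp - 1) fuel else tmp

def country_helper (content : String) (countries : List String) (attempts : Int) : String :=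
  let cs := content.toList
  let comp : Int := (cs.length : Int) - attempts
  String.ofList (pvHeader ++ pvLoopA countries cs comp ((if comp < 1 then 1 else comp).toNat))

-- ===== PORT B =====

-- match(k): any lowered country starts with content[:k]
def pvMatchB (lows : List (List Char)) (cs : List Char) (k : Int) : Bool :=
  lows.any (fun l => PySem.Chars.startswith l (PySem.List.slice cs none (some k)))

-- the binary-search while-loop; fuel = hi - lo guards totality (the gap shrinks each step)
def pvLoopB (lows : List (List Char)) (cs : List Char) (lo hi : Int) : Nat → Int
  | 0 => lo
  | fuel + 1 =>
    if lo < hi then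
      let mid := PySem.Int.floordiv (lo + hi + 1) 2
      if pvMatchB lows cs mid then pvLoopB lows cs mid hi fuel
      else pvLoopB lows cs lo (mid - 1) fuel
    else lo

def country_helper_alt (content : String) (countries : List String) (attempts : Int) : String :=
  let cs := content.toList
  let lows := countries.map (fun c => PySem.Chars.lower c.toList)
  let hi : Int := max 1 ((cs.length : Int) - attempts)
  let lo := pvLoopB lows cs 1 hi (hi - 1).toNat
  let s := PySem.List.slice cs none (some lo)
  String.ofList (pvHeader ++
    ((countries.zip lows).filter (fun p => PySem.Chars.startswith p.2 s)).flatMap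
      (fun p => pvRender p.1))

-- ===== PRECONDITION & SPEC =====
-- Pre_ excludes exactly the inputs on which A's 'while True' never terminates: those where no
-- country's lowercase form starts with the one-character prefix content[:1] (including an empty
-- country list); A returns on every other input.
def Pre_country_helper (content : String) (countries : List String) (attempts : Int) : Prop :=
  countries.any
    (fun c => PySem.Chars.startswith (PySem.Chars.lower c.toList) (content.toList.take 1)) = true
instance (content : String) (countries : List String) (attempts : Int) : Decidable (Pre_country_helper content countries attempts) := by unfold Pre_country_helper; infer_instance

def pvWitness_country_helper : String × List String × Int := ("germ", ["Germany", "France"], 2)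

def Spec_country_helper (content : String) (countries : List String) (attempts : Int) (out : String) : Prop := out = country_helper_alt content countries attempts
instance (content : String) (countries : List String) (attempts : Int) (out : String) : Decidable (Spec_country_helper content countries attempts out) := by unfold Spec_country_helper; infer_instance

-- ===== CLAIM (what is proved, stated in full; the proofs are below) =====
def Claim_equal_country_helper : Prop := ∀ (content : String) (countries : List String) (attempts : Int), Dom_country_helper content countries attempts → Pre_country_helper content countries attempts → Spec_country_helper content countries attempts (country_helper content countries attempts)

-- ===== LEMMAS AND PROOFS =====

-- the match predicate at prefix length k
def pvM (countries : List String) (cs : List Char) (k : Nat) : Bool :=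
  countries.any (fun c => PySem.Chars.startswith (PySem.Chars.lower c.toList) (cs.take k))

-- the largest k in [1, n] with pvM (0 if none)
def pvBest (countries : List String) (cs : List Char) : Nat → Nat
  | 0 => 0
  | n + 1 => if pvM countries cs (n + 1) then n + 1 else pvBest countries cs n

theorem pvM_mono (countries : List String) (cs : List Char) {j k : Nat} (hjk : j ≤ k)
    (h : pvM countries cs k = true) : pvM countries cs j = true := by
  simp only [pvM, List.any_eq_true] at h ⊢
  obtain ⟨c, hc, hs⟩ := h
  refine ⟨c, hc, ?_⟩
  rw [PySem.Chars.startswith_iff] at hs ⊢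
  have h2 : cs.take j = (cs.take k).take j := by
    rw [List.take_take, Nat.min_eq_left hjk]
  exact (h2 ▸ List.take_prefix j (cs.take k)).trans hs

theorem pvTmpA_eq (countries : List String) (search : List Char) (acc : List Char) :
    countries.foldl
      (fun tmp country =>
        if PySem.Chars.startswith (PySem.Chars.lower country.toList) search then tmp ++ pvRender country
        else tmp) acc
    = acc ++ (countries.filter
        (fun c => PySem.Chars.startswith (PySem.Chars.lower c.toList) search)).flatMap pvRender := by
  induction countries generalizing acc with
  | nil => simp
  | cons c rest ih =>
    simp only [List.foldl_cons, List.filter_cons]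
    by_cases h : PySem.Chars.startswith (PySem.Chars.lower c.toList) search = true
    · rw [if_pos h, ih]
      simp [h, pvRender, List.append_assoc]
    · rw [if_neg h, ih]
      simp [h]

theorem pvTmpA_nil_iff (countries : List String) (cs : List Char) (k : Nat) :
    pvTmpA countries (cs.take k) = [] ↔ pvM countries cs k = false := by
  rw [pvTmpA, pvTmpA_eq, List.nil_append]
  constructor
  · intro h
    rw [pvM]
    by_contra hM
    rw [Bool.not_eq_false, List.any_eq_true] at hM
    obtain ⟨c, hc, hs⟩ := hM
    have hmem : c ∈ countries.filter (fun c => PySem.Chars.startswith (PySem.Chars.lower c.toList) (cs.take k)) :=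
      List.mem_filter.mpr ⟨hc, hs⟩
    rcases hfe : countries.filter (fun c => PySem.Chars.startswith (PySem.Chars.lower c.toList) (cs.take k)) with _ | ⟨d, rest⟩
    · rw [hfe] at hmem; simp at hmem
    · rw [hfe] at h; simp [pvRender] at h
  · intro h
    have : countries.filter (fun c => PySem.Chars.startswith (PySem.Chars.lower c.toList) (cs.take k)) = [] := by
      rw [List.filter_eq_nil_iff]
      intro c hc
      rw [pvM, List.any_eq_false] at h
      simpa using h c hc
    simp [this]

theorem pvBest_unique (countries : List String) (cs : List Char) {n m : Nat}
    (hm1 : 1 ≤ m) (hmn : m ≤ n) (hM : pvM countries cs m = true)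
    (habove : ∀ k, m < k → k ≤ n → pvM countries cs k = false) :
    pvBest countries cs n = m := by
  induction n with
  | zero => omega
  | succ n ih =>
    rw [pvBest]
    by_cases h : pvM countries cs (n + 1) = true
    · simp only [h, if_true]
      by_contra hne
      have : m < n + 1 := by omega
      exact absurd h (by simpa using habove (n + 1) this le_rfl)
    · simp only [h]
      have hmn' : m ≤ n := by
        rcases Nat.lt_or_ge m (n + 1) with h' | h'
        · omega
        · have : m = n + 1 := by omega
          subst this; exact absurd hM (by simpa using h)
      exact ih hmn' (fun k hk hk' => habove k hk (by omega))

theorem pvLoopA_eq (countries : List String) (cs : List Char)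
    (h1 : pvM countries cs 1 = true) :
    ∀ (fuel n : Nat), 1 ≤ n → n ≤ fuel →
      pvLoopA countries cs (n : Int) fuel = pvTmpA countries (cs.take (pvBest countries cs n)) := by
  intro fuel
  induction fuel with
  | zero => intro n h1n hf; omega
  | succ fuel ih =>
    intro n h1n hf
    rw [pvLoopA]
    have hclamp : ¬ ((n : Int) < 1) := by exact_mod_cast Nat.not_lt.mpr h1n
    simp only [hclamp, if_false]
    rw [PySem.List.slice_to cs (Int.natCast_nonneg n), Int.toNat_natCast]
    by_cases hM : pvM countries cs n = true
    · have : ¬ (pvTmpA countries (cs.take n) = []) := by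
        rw [pvTmpA_nil_iff]; simp [hM]
      simp only [this, if_false]
      have : pvBest countries cs n = n := by
        rcases n with _ | n
        · omega
        · rw [pvBest]; simp [hM]
      rw [this]
    · have hnil : pvTmpA countries (cs.take n) = [] := by
        rw [pvTmpA_nil_iff]; simpa using hM
      simp only [hnil, if_true]
      have hn1 : 1 < n := by
        rcases Nat.eq_or_lt_of_le h1n with h | h
        · exact absurd h1 (by rw [← h] at hM; simpa using hM)
        · exact h
      have hcast : (n : Int) - 1 = ((n - 1 : Nat) : Int) := by omega
      rw [hcast, ih (n - 1) (by omega) (by omega)]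
      have : pvBest countries cs n = pvBest countries cs (n - 1) := by
        rcases n with _ | n
        · omega
        · rw [pvBest]; simpa [Nat.add_sub_cancel] using fun h => absurd h (by simpa using hM)
      rw [this]

theorem pvMatchB_eq (countries : List String) (cs : List Char) (k : Int) (hk : 0 ≤ k) :
    pvMatchB (countries.map (fun c => PySem.Chars.lower c.toList)) cs k
      = pvM countries cs k.toNat := by
  rw [pvMatchB, pvM, PySem.List.slice_to cs hk, List.any_map]
  rfl

theorem pvLoopB_eq (countries : List String) (cs : List Char) {N : Nat} :
    ∀ (fuel : Nat) (lo hi : Int), 1 ≤ lo → lo ≤ hi → hi ≤ (N : Int) →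
      (hi - lo).toNat ≤ fuel →
      pvM countries cs lo.toNat = true →
      (∀ k : Nat, hi < (k : Int) → k ≤ N → pvM countries cs k = false) →
      pvLoopB (countries.map (fun c => PySem.Chars.lower c.toList)) cs lo hi fuel
        = (pvBest countries cs N : Int) := by
  intro fuel
  induction fuel with
  | zero =>
    intro lo hi hlo hlohi hhiN hfuel hMlo habove
    have : lo = hi := by omega
    subst this
    rw [pvLoopB]
    symm
    have := pvBest_unique countries cs (n := N) (m := lo.toNat)
      (by omega) (by omega) hMlo
      (fun k hk hk' => habove k (by omega) hk')
    omega
  | succ fuel ih =>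
    intro lo hi hlo hlohi hhiN hfuel hMlo habove
    rw [pvLoopB]
    by_cases hlt : lo < hi
    · simp only [hlt, if_true]
      have hmid_lo : lo + 1 ≤ PySem.Int.floordiv (lo + hi + 1) 2 := by
        rw [PySem.Int.le_floordiv_iff_mul_le (by omega)]; omega
      have hmid_hi : PySem.Int.floordiv (lo + hi + 1) 2 < hi + 1 := by
        rw [PySem.Int.floordiv_lt_iff_lt_mul (by omega)]; omega
      set mid := PySem.Int.floordiv (lo + hi + 1) 2 with hmid
      rw [pvMatchB_eq countries cs mid (by omega)]
      by_cases hM : pvM countries cs mid.toNat = true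
      · simp only [hM, if_true]
        exact ih mid hi (by omega) (by omega) hhiN (by omega) hM habove
      · simp only [hM]
        refine ih lo (mid - 1) hlo (by omega) (by omega) (by omega) hMlo ?_
        intro k hk hkN
        rcases Nat.lt_or_ge N k with h' | h'
        · omega
        · by_cases hkhi : hi < (k : Int)
          · exact habove k hkhi hkN
          · have hmk : mid.toNat ≤ k := by omega
            by_contra hMk
            exact hM (pvM_mono countries cs hmk (by simpa using hMk))
    · simp only [hlt, if_false]
      have : lo = hi := by omega
      subst this
      symm
      have := pvBest_unique countries cs (n := N) (m := lo.toNat)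
        (by omega) (by omega) hMlo
        (fun k hk hk' => habove k (by omega) hk')
      omega

theorem pvZipFilter (countries : List String) (s : List Char) :
    ((countries.zip (countries.map (fun c => PySem.Chars.lower c.toList))).filter
        (fun p => PySem.Chars.startswith p.2 s)).flatMap (fun p => pvRender p.1)
      = (countries.filter
          (fun c => PySem.Chars.startswith (PySem.Chars.lower c.toList) s)).flatMap pvRender := by
  induction countries with
  | nil => rfl
  | cons c rest ih =>
    simp only [List.map_cons, List.zip_cons_cons, List.filter_cons]
    by_cases h : PySem.Chars.startswith (PySem.Chars.lower c.toList) s = true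
    · simp [h, ih]
    · simp [h, ih]

-- ===== VERDICT (by name: the statement is the Claim_ definition above) =====
theorem country_helper_spec : Claim_equal_country_helper := by
  intro content countries attempts _ hpre
  simp only [Spec_country_helper, country_helper, country_helper_alt]
  set cs := content.toList with hcs
  have h1 : pvM countries cs 1 = true := hpre
  set comp : Int := (cs.length : Int) - attempts with hcomp
  set N : Nat := (max 1 comp).toNat with hN
  have hN1 : 1 ≤ N := by omega
  have hclampN : (if comp < 1 then 1 else comp) = (N : Int) := by omega
  -- A side
  have hA : pvLoopA countries cs comp ((if comp < 1 then 1 else comp).toNat)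
      = pvTmpA countries (cs.take (pvBest countries cs N)) := by
    have hfirst : ∀ fuel, pvLoopA countries cs comp fuel = pvLoopA countries cs (N : Int) fuel := by
      intro fuel
      rcases fuel with _ | fuel
      · rfl
      · rw [pvLoopA, pvLoopA]
        rcases lt_or_ge comp 1 with h | h
        · have h1' : ¬ ((N : Int) < 1) := by omega
          have : (N : Int) = 1 := by omega
          simp only [h, if_true, this]
          norm_num
        · have h1' : ¬ (comp < 1) := by omega
          have : (N : Int) = comp := by omega
          simp only [h1', if_false, this]
    rw [hfirst, hclampN, Int.toNat_natCast]
    exact pvLoopA_eq countries cs h1 N N hN1 le_rfl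
  -- B side
  have hBmax : max 1 comp = (N : Int) := by omega
  have hB : pvLoopB (countries.map (fun c => PySem.Chars.lower c.toList)) cs 1 (max 1 comp)
      ((max 1 comp) - 1).toNat = (pvBest countries cs N : Int) := by
    rw [hBmax]
    exact pvLoopB_eq countries cs _ 1 (N : Int) le_rfl (by omega) le_rfl le_rfl
      (by simpa using h1)
      (fun k hk hk' => by omega)
  rw [hA, hB]
  rw [PySem.List.slice_to cs (Int.natCast_nonneg _), Int.toNat_natCast, pvZipFilter]
  rw [pvTmpA, pvTmpA_eq, List.nil_append]
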